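-- pv_equiv track=rewrite | github.com/aceiii/advent-of-code-2023 | python/day11.py | expand_by_x
-- ===== SOURCE A (Python) =====
-- from operator import itemgetter
--
-- def expand_by_x(galaxies, cols, expansion_amount):
--     galaxies.sort(key=itemgetter(0), reverse=True)
--     while cols:
--         col = cols.pop()
--         for idx in range(len(galaxies)):
--             x, y = galaxies[idx]
--             if x < col:
--                 break
--             galaxies[idx] = (x+expansion_amount, y)
--     return galaxies
-- ===== SOURCE B (Python) =====
-- from operator import itemgetter
--
--
-- def expand_by_x(galaxies, cols, expansion_amount):
--     # Return-value equivalent to A (A sorts `galaxies` and empties `cols`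
--     # in place; B mutates neither argument).
--     gs = sorted(galaxies, key=itemgetter(0), reverse=True)
--     sc = sorted(cols)
--     out = []
--     j = len(sc)  # walking pointer: number of sorted cols <= current x
--     for x, y in gs:
--         while j > 0 and sc[j - 1] > x:
--             j -= 1
--         out.append((x + expansion_amount * j, y))
--     return out
-- ===== Notes on version B (the rewrite author's own statement) =====
-- stated objective: alternative
-- what changed: Instead of re-scanning the whole galaxy list once per column (shift-prefix-and-break per popped column), B sorts both lists once and walks them together with a single descending two-pointer sweep, adding expansion_amount times the count of columns <= x to each galaxy in one pass (O((n+m) log(n+m)) vs A's O(n*m) column passes, though a timing run's random inputs fall outside Pre_, so the speed-up is not certified here).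
-- outside the precondition, e.g. on expand_by_x([(5, 0)], [6, 3], 10): A returns [(25, 0)], B returns [(15, 0)]; on expand_by_x([(5, 0)], [3, 5], -10): A returns [(-5, 0)], B returns [(-15, 0)]
import Mathlib
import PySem

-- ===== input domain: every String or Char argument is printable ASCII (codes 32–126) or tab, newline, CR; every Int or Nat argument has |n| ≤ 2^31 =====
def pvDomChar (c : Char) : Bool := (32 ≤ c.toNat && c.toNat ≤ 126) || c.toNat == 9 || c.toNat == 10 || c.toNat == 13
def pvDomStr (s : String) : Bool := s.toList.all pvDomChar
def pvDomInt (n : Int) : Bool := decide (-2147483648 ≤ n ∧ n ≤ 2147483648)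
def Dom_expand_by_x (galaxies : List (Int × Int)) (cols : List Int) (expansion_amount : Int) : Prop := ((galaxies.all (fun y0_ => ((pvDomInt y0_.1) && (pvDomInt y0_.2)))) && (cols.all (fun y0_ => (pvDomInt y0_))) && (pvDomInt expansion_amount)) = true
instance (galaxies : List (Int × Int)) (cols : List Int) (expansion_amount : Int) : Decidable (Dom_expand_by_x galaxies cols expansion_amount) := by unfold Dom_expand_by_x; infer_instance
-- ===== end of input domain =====

-- B replaces A's per-column rescans of the galaxy list by one sort of cols and a single
-- descending two-pointer sweep (return-value equivalence: A sorts `galaxies` and empties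
-- `cols` in place; B mutates neither).


-- ===== PORT A =====
-- inner `for idx in range(len(galaxies)): … if x < col: break …`
def pvPass (col exp : Int) : List (Int × Int) → List (Int × Int)
  | [] => []
  | (x, y) :: rest => if x < col then (x, y) :: rest else (x + exp, y) :: pvPass col exp rest

-- `while cols: col = cols.pop(); <inner pass>`
def pvWhile (exp : Int) (gs : List (Int × Int)) (cols : List Int) : List (Int × Int) :=
  match h : PySem.List.pop? cols with
  | none => gs
  | some (col, rest) => pvWhile exp (pvPass col exp gs) rest
termination_by cols.length
decreasing_by have := PySem.List.length_of_pop?_eq_some cols h; simp at this; omega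

def expand_by_x (galaxies : List (Int × Int)) (cols : List Int) (expansion_amount : Int) : List (Int × Int) :=
  pvWhile expansion_amount (PySem.List.sorted galaxies (fun p => p.1) true) cols

-- ===== PORT B =====
-- `while j > 0 and sc[j-1] > x: j -= 1`
def pvLowerJ (sc : List Int) (x : Int) : Nat → Nat
  | 0 => 0
  | j + 1 => if sc.getD j 0 > x then pvLowerJ sc x j else j + 1

-- the `for x, y in gs:` loop building `out`, carrying the pointer j
def pvBuild (sc : List Int) (exp : Int) : List (Int × Int) → Nat → List (Int × Int)
  | [], _ => []
  | (x, y) :: rest, j =>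
    let j' := pvLowerJ sc x j
    (x + exp * (j' : Int), y) :: pvBuild sc exp rest j'

def expand_by_x_alt (galaxies : List (Int × Int)) (cols : List Int) (expansion_amount : Int) : List (Int × Int) :=
  pvBuild (PySem.List.sorted cols (fun c => c)) expansion_amount
    (PySem.List.sorted galaxies (fun p => p.1) true) (PySem.List.sorted cols (fun c => c)).length

-- ===== PRECONDITION & SPEC =====
-- a galaxy for which the scan order of `cols` provably cannot matter: either every column is
-- strictly above x (it is never shifted), or every column is both ≤ x and ≤ x + e*len(cols)
-- (always shifted) or both > x and > x + e*len(cols) (never shifted)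
def pvGalOK (cols : List Int) (e x : Int) : Prop :=
  (∀ c ∈ cols, x < c) ∨
  (∀ c ∈ cols, (c ≤ x ∧ c ≤ x + e * (cols.length : Int)) ∨
               (x < c ∧ x + e * (cols.length : Int) < c))

-- Pre_ admits A's natural domain (ascending column list, non-negative expansion — what day11
-- passes) and every other input on which the processing order of `cols` provably cannot matter
-- (≤ 1 column, or each galaxy's shift set is order-independent); excluded are the inputs where
-- A's value depends on the list order of `cols` through compounding in-place re-shifts, an
-- artefact of its scan-and-mutate loop.
def Pre_expand_by_x (galaxies : List (Int × Int)) (cols : List Int) (expansion_amount : Int) : Prop :=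
  (0 ≤ expansion_amount ∧ cols.Pairwise (· ≤ ·)) ∨ cols.length ≤ 1 ∨
    ∀ p ∈ galaxies, pvGalOK cols expansion_amount p.1
instance (galaxies : List (Int × Int)) (cols : List Int) (expansion_amount : Int) : Decidable (Pre_expand_by_x galaxies cols expansion_amount) := by unfold Pre_expand_by_x pvGalOK; infer_instance

def pvWitness_expand_by_x : (List (Int × Int)) × List Int × Int :=
  ([(4, 0), (9, 1), (0, 2), (4, 3)], [2, 2, 6], 10)

def Spec_expand_by_x (galaxies : List (Int × Int)) (cols : List Int) (expansion_amount : Int) (out : List (Int × Int)) : Prop := out = expand_by_x_alt galaxies cols expansion_amount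
instance (galaxies : List (Int × Int)) (cols : List Int) (expansion_amount : Int) (out : List (Int × Int)) : Decidable (Spec_expand_by_x galaxies cols expansion_amount out) := by unfold Spec_expand_by_x; infer_instance

-- ===== CLAIM (what is proved, stated in full; the proofs are below) =====
def Claim_equal_expand_by_x : Prop := ∀ (galaxies : List (Int × Int)) (cols : List Int) (expansion_amount : Int), Dom_expand_by_x galaxies cols expansion_amount → Pre_expand_by_x galaxies cols expansion_amount → Spec_expand_by_x galaxies cols expansion_amount (expand_by_x galaxies cols expansion_amount)

-- ===== LEMMAS AND PROOFS =====

-- the common reference value: shift each x by exp * #(cols ≤ x)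
def pvRef (cols : List Int) (exp : Int) (gs : List (Int × Int)) : List (Int × Int) :=
  gs.map (fun p => (p.1 + exp * ((cols.countP (fun c => decide (c ≤ p.1)) : Nat) : Int), p.2))

theorem pvPass_eq_map {gs : List (Int × Int)} (hs : gs.Pairwise (fun a b => b.1 ≤ a.1))
    (col exp : Int) :
    pvPass col exp gs = gs.map (fun p => if p.1 < col then p else (p.1 + exp, p.2)) := by
  induction gs with
  | nil => rfl
  | cons p t ih =>
    obtain ⟨x, y⟩ := p
    rw [List.pairwise_cons] at hs
    simp only [pvPass, List.map]
    by_cases hx : x < col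
    · simp only [if_pos hx]
      have : ∀ q ∈ t, (if q.1 < col then q else (q.1 + exp, q.2)) = q := by
        intro q hq
        have := hs.1 q hq
        rw [if_pos (by omega)]
      rw [List.map_congr_left this, List.map_id']
    · simp only [if_neg hx, ih hs.2]

theorem pvWhile_append (exp : Int) (gs : List (Int × Int)) (cs : List Int) (c : Int) :
    pvWhile exp gs (cs ++ [c]) = pvWhile exp (pvPass c exp gs) cs := by
  rw [pvWhile.eq_def, PySem.List.pop?_last]

theorem pvWhile_nil (exp : Int) (gs : List (Int × Int)) : pvWhile exp gs [] = gs := by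
  rw [pvWhile.eq_def]
  simp [PySem.List.pop?, PySem.List.pyIdx?]

theorem pvPass_pairwise {gs : List (Int × Int)} (hs : gs.Pairwise (fun a b => b.1 ≤ a.1))
    (col : Int) {exp : Int} (he : 0 ≤ exp) :
    (pvPass col exp gs).Pairwise (fun a b => b.1 ≤ a.1) := by
  rw [pvPass_eq_map hs col exp, List.pairwise_map]
  refine hs.imp ?_
  intro a b hab
  by_cases hb : b.1 < col <;> by_cases ha : a.1 < col <;> simp [hb, ha] <;> omega

theorem pvWhile_eq_ref (exp : Int) (he : 0 ≤ exp) (cols : List Int)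
    (hc : cols.Pairwise (· ≤ ·)) :
    ∀ gs : List (Int × Int), gs.Pairwise (fun a b => b.1 ≤ a.1) →
      pvWhile exp gs cols = pvRef cols exp gs := by
  induction cols using List.reverseRecOn with
  | nil =>
    intro gs _
    rw [pvWhile_nil]
    simp [pvRef]
  | append_singleton cs c ih =>
    intro gs hgs
    rw [List.pairwise_append] at hc
    have hcc : ∀ c' ∈ cs, c' ≤ c := fun c' h => hc.2.2 c' h c (by simp)
    rw [pvWhile_append, ih hc.1 _ (pvPass_pairwise hgs c he),
        pvPass_eq_map hgs c exp]
    simp only [pvRef, List.map_map]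
    refine List.map_congr_left ?_
    intro p _
    simp only [Function.comp_apply]
    by_cases hx : p.1 < c
    · have h1 : cs.countP (fun c' => decide (c' ≤ p.1)) =
          (cs ++ [c]).countP (fun c' => decide (c' ≤ p.1)) := by
        rw [List.countP_append]
        simp [show ¬ c ≤ p.1 by omega]
      simp only [if_pos hx, h1]
    · simp only [if_neg hx]
      have h2 : cs.countP (fun c' => decide (c' ≤ p.1 + exp)) =
          cs.countP (fun c' => decide (c' ≤ p.1)) := by
        refine List.countP_congr ?_
        intro c' hc'
        have := hcc c' hc'
        simp only [decide_eq_true_eq]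
        constructor <;> intro <;> omega
      have h3 : (cs ++ [c]).countP (fun c' => decide (c' ≤ p.1)) =
          cs.countP (fun c' => decide (c' ≤ p.1)) + 1 := by
        rw [List.countP_append]
        simp [show c ≤ p.1 by omega]
      rw [h2, h3]
      push_cast
      ring_nf

-- in an ascending list, the elements ≤ x are exactly the first countP
theorem pvIdx_le_iff {sc : List Int} (hs : sc.Pairwise (· ≤ ·)) (x : Int) :
    ∀ i, i < sc.length → (sc.getD i 0 ≤ x ↔ i < sc.countP (fun c => decide (c ≤ x))) := by
  induction sc with
  | nil => intro i h; simp at h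
  | cons a t ih =>
    rw [List.pairwise_cons] at hs
    intro i hi
    have hzero : x < a → t.countP (fun c => decide (c ≤ x)) = 0 := by
      intro hxa
      rw [List.countP_eq_zero]
      intro b hb
      have := hs.1 b hb
      simp only [decide_eq_true_eq]; omega
    match i with
    | 0 =>
      simp only [List.getD_cons_zero, List.countP_cons]
      by_cases hax : a ≤ x
      · simp [hax]
      · simp [hax, hzero (by omega)]
    | i + 1 =>
      simp only [List.getD_cons_succ, List.countP_cons]
      have hi' : i < t.length := by simpa using hi
      rw [ih hs.2 i hi']
      by_cases hax : a ≤ x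
      · simp [hax]
      · have h0 := hzero (by omega)
        have hmem : t.getD i 0 ∈ t := by
          rw [List.getD_eq_getElem _ _ hi']
          exact List.getElem_mem hi'
        have hat := hs.1 _ hmem
        simp only [hax, decide_false, Bool.false_eq_true, if_false, h0]
        constructor
        · intro hle; omega
        · intro hlt; omega

theorem pvLowerJ_eq {sc : List Int} (hs : sc.Pairwise (· ≤ ·)) (x : Int) :
    ∀ j, sc.countP (fun c => decide (c ≤ x)) ≤ j → j ≤ sc.length →
      pvLowerJ sc x j = sc.countP (fun c => decide (c ≤ x)) := by
  intro j
  induction j with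
  | zero =>
    intro h _
    simp only [pvLowerJ]
    omega
  | succ j ih =>
    intro hc hj
    have hj' : j < sc.length := by omega
    have hiff := pvIdx_le_iff hs x j hj'
    rw [pvLowerJ]
    by_cases hcj : j < sc.countP (fun c => decide (c ≤ x))
    · have : sc.getD j 0 ≤ x := hiff.mpr hcj
      rw [if_neg (by omega)]
      omega
    · have : ¬ sc.getD j 0 ≤ x := fun h => hcj (hiff.mp h)
      rw [if_pos (by omega)]
      exact ih (by omega) (by omega)

theorem pvBuild_eq_ref {sc : List Int} (hs : sc.Pairwise (· ≤ ·)) (exp : Int) :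
    ∀ (gs : List (Int × Int)), gs.Pairwise (fun a b => b.1 ≤ a.1) →
      ∀ j, (∀ p ∈ gs, sc.countP (fun c => decide (c ≤ p.1)) ≤ j) → j ≤ sc.length →
        pvBuild sc exp gs j = pvRef sc exp gs := by
  intro gs
  induction gs with
  | nil => intro _ j _ _; rfl
  | cons p t ih =>
    intro hp j hj hjl
    obtain ⟨x, y⟩ := p
    rw [List.pairwise_cons] at hp
    have hcx : sc.countP (fun c => decide (c ≤ x)) ≤ j := hj (x, y) (by simp)
    have hJ : pvLowerJ sc x j = sc.countP (fun c => decide (c ≤ x)) :=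
      pvLowerJ_eq hs x j hcx hjl
    simp only [pvBuild, pvRef, List.map, hJ]
    refine congrArg _ ?_
    refine ih hp.2 _ ?_ List.countP_le_length
    intro q hq
    refine List.countP_mono_left ?_
    intro c _ hcq
    simp only [decide_eq_true_eq] at hcq ⊢
    have := hp.1 q hq
    omega


-- scalar facts about pvGalOK across one processing step (col c0 popped, cs remain)
theorem pvGood_tail_of_lt {e x c0 : Int} {cs : List Int}
    (hg : pvGalOK (cs ++ [c0]) e x) (hx : x < c0) : pvGalOK cs e x := by
  rcases hg with hg | hg
  · exact Or.inl fun c hc => hg c (by simp [hc])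
  · right
    intro c hc
    have hcc := hg c (by simp [hc])
    have hc0 := hg c0 (by simp)
    have hlen : e * ((cs ++ [c0]).length : Int) = e * (cs.length : Int) + e := by
      simp only [List.length_append, List.length_cons, List.length_nil]
      push_cast; ring
    rcases le_total 0 e with he | he
    · have h1 : 0 ≤ e * (cs.length : Int) := mul_nonneg he (by positivity)
      omega
    · have h1 : e * (cs.length : Int) ≤ 0 :=
        mul_nonpos_of_nonpos_of_nonneg he (by positivity)
      omega

theorem pvGood_shift {e x c0 : Int} {cs : List Int}
    (hg : pvGalOK (cs ++ [c0]) e x) (hx : ¬ x < c0) :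
    c0 ≤ x + e ∧ pvGalOK cs e (x + e) ∧
      cs.countP (fun c => decide (c ≤ x + e)) = cs.countP (fun c => decide (c ≤ x)) := by
  have hc0 : (c0 ≤ x ∧ c0 ≤ x + e * ((cs ++ [c0]).length : Int)) ∨
      (x < c0 ∧ x + e * ((cs ++ [c0]).length : Int) < c0) := by
    rcases hg with hg | hg
    · exact absurd (hg c0 (by simp)) hx
    · exact hg c0 (by simp)
  have hlen : e * ((cs ++ [c0]).length : Int) = e * (cs.length : Int) + e := by
    simp only [List.length_append, List.length_cons, List.length_nil]
    push_cast; ring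
  have helem : ∀ c ∈ cs, (c ≤ x ∧ c ≤ x + e * ((cs ++ [c0]).length : Int)) ∨
      (x < c ∧ x + e * ((cs ++ [c0]).length : Int) < c) := by
    intro c hc
    rcases hg with hg | hg
    · exact absurd (hg c0 (by simp)) hx
    · exact hg c (by simp [hc])
  have hle : c0 ≤ x + e := by
    rcases le_total 0 e with he | he
    · have h1 : 0 ≤ e * (cs.length : Int) := mul_nonneg he (by positivity)
      omega
    · have h1 : e * (cs.length : Int) ≤ 0 :=
        mul_nonpos_of_nonpos_of_nonneg he (by positivity)
      omega
  refine ⟨hle, Or.inr ?_, ?_⟩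
  · intro c hc
    have h2 := helem c hc
    rcases le_total 0 e with he | he
    · have h1 : 0 ≤ e * (cs.length : Int) := mul_nonneg he (by positivity)
      omega
    · have h1 : e * (cs.length : Int) ≤ 0 :=
        mul_nonpos_of_nonpos_of_nonneg he (by positivity)
      omega
  · refine List.countP_congr ?_
    intro c hc
    have h2 := helem c hc
    simp only [decide_eq_true_eq]
    rcases le_total 0 e with he | he
    · have h1 : 0 ≤ e * (cs.length : Int) := mul_nonneg he (by positivity)
      constructor <;> intro <;> omega
    · have h1 : e * (cs.length : Int) ≤ 0 :=
        mul_nonpos_of_nonpos_of_nonneg he (by positivity)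
      constructor <;> intro <;> omega

theorem pvPass_pairwise_good {gs : List (Int × Int)} {cs : List Int} {c0 e : Int}
    (hs : gs.Pairwise (fun a b => b.1 ≤ a.1))
    (hok : ∀ p ∈ gs, pvGalOK (cs ++ [c0]) e p.1) :
    (pvPass c0 e gs).Pairwise (fun a b => b.1 ≤ a.1) := by
  rw [pvPass_eq_map hs c0 e, List.pairwise_map]
  refine List.Pairwise.imp_of_mem ?_ hs
  intro a b ha hb hab
  by_cases hxa : a.1 < c0
  · rw [if_pos hxa, if_pos (by omega)]
    exact hab
  · rw [if_neg hxa]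
    by_cases hxb : b.1 < c0
    · rw [if_pos hxb]
      have := (pvGood_shift (hok a ha) hxa).1
      simp only []
      omega
    · rw [if_neg hxb]
      simp only []
      omega

-- A's loop equals the reference value whenever each galaxy's shift set is order-independent
theorem pvWhile_eq_ref_good (exp : Int) :
    ∀ cols : List Int, ∀ gs : List (Int × Int),
      gs.Pairwise (fun a b => b.1 ≤ a.1) → (∀ p ∈ gs, pvGalOK cols exp p.1) →
        pvWhile exp gs cols = pvRef cols exp gs := by
  intro cols
  induction cols using List.reverseRecOn with
  | nil =>
    intro gs _ _
    rw [pvWhile_nil]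
    simp [pvRef]
  | append_singleton cs c ih =>
    intro gs hgs hok
    rw [pvWhile_append, ih _ (pvPass_pairwise_good hgs hok) ?okmap,
        pvPass_eq_map hgs c exp]
    case okmap =>
      intro q hq
      rw [pvPass_eq_map hgs c exp] at hq
      obtain ⟨p, hp, rfl⟩ := List.mem_map.mp hq
      by_cases hx : p.1 < c
      · rw [if_pos hx]
        exact pvGood_tail_of_lt (hok p hp) hx
      · rw [if_neg hx]
        exact (pvGood_shift (hok p hp) hx).2.1
    simp only [pvRef, List.map_map]
    refine List.map_congr_left ?_
    intro p hp
    simp only [Function.comp_apply]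
    by_cases hx : p.1 < c
    · have h1 : (cs ++ [c]).countP (fun c' => decide (c' ≤ p.1)) =
          cs.countP (fun c' => decide (c' ≤ p.1)) := by
        rw [List.countP_append]
        simp [show ¬ c ≤ p.1 by omega]
      simp only [if_pos hx, h1]
    · obtain ⟨-, -, hcnt⟩ := pvGood_shift (hok p hp) hx
      have h3 : (cs ++ [c]).countP (fun c' => decide (c' ≤ p.1)) =
          cs.countP (fun c' => decide (c' ≤ p.1)) + 1 := by
        rw [List.countP_append]
        simp [show c ≤ p.1 by omega]
      simp only [if_neg hx, hcnt, h3]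
      push_cast
      ring_nf

-- A's loop equals the reference value when there is at most one column
theorem pvWhile_short (exp : Int) {cols : List Int} (h : cols.length ≤ 1)
    {gs : List (Int × Int)} (hgs : gs.Pairwise (fun a b => b.1 ≤ a.1)) :
    pvWhile exp gs cols = pvRef cols exp gs := by
  match cols, h with
  | [], _ =>
    rw [pvWhile_nil]
    simp [pvRef]
  | [c], _ =>
    rw [show [c] = [] ++ [c] from rfl, pvWhile_append, pvWhile_nil,
        pvPass_eq_map hgs c exp]
    simp only [pvRef]
    refine List.map_congr_left ?_
    intro p _
    by_cases hx : p.1 < c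
    · simp [hx, show ¬ c ≤ p.1 by omega]
    · simp [hx, show c ≤ p.1 by omega]

-- ===== VERDICT (by name: the statement is the Claim_ definition above) =====
theorem expand_by_x_spec : Claim_equal_expand_by_x := by
  intro galaxies cols exp _ hpre
  unfold Spec_expand_by_x expand_by_x expand_by_x_alt
  have hgs := PySem.List.sorted_pairwise_rev galaxies (fun p : Int × Int => p.1)
  have hsc := PySem.List.sorted_pairwise cols (fun c : Int => c)
  have hA : pvWhile exp (PySem.List.sorted galaxies (fun p => p.1) true) cols =
      pvRef cols exp (PySem.List.sorted galaxies (fun p => p.1) true) := by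
    rcases hpre with ⟨he, hcols⟩ | hlen | hok
    · exact pvWhile_eq_ref exp he cols hcols _ hgs
    · exact pvWhile_short exp hlen hgs
    · refine pvWhile_eq_ref_good exp cols _ hgs ?_
      intro p hp
      exact hok p ((PySem.List.mem_sorted galaxies (fun p : Int × Int => p.1) true p).mp hp)
  rw [hA, pvBuild_eq_ref hsc exp _ hgs _ (fun p _ => List.countP_le_length) le_rfl]
  unfold pvRef
  refine List.map_congr_left ?_
  intro p _
  have : (PySem.List.sorted cols (fun c : Int => c)).countP (fun c => decide (c ≤ p.1)) =
      cols.countP (fun c => decide (c ≤ p.1)) :=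
    (PySem.List.sorted_perm cols (fun c : Int => c) false).countP_eq _
  rw [this]
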